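-- pv_equiv track=rewrite | github.com/YohansHailu/interview_prep | squied games/earliestFullBloom.py | earliestFullBloom
-- ===== SOURCE A (Python) =====
-- from typing import List
--
-- def earliestFullBloom(plantTime: List[int], growTime: List[int]) -> int:
--
--     # you plant the logest first
--
--     # or you see the sum
--
--     # you see the order
--
--     work = list(zip(plantTime, growTime))
--
--     work.sort(key = lambda x: x[1])
--
--     work.reverse()
--     offset = 0
--     res = 0
--     for plant, grow in work:
--         total = plant + grow + offset
--         res = max(res, total)
--         offset += plant
--
--     return res
-- ===== SOURCE B (Python) =====
-- from typing import List
--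
-- def earliestFullBloom(plantTime: List[int], growTime: List[int]) -> int:
--     # Horner-style nested-max fold over the ascending grow-time order:
--     # answer = max(0, p_n + max(g_n, ... p_1 + max(g_1, p_0 + g_0) ...))
--     # No running plant-time offset and no per-plant candidate list are kept.
--     work = sorted(zip(plantTime, growTime), key=lambda x: x[1])
--     if not work:
--         return 0
--     acc = work[0][0] + work[0][1]
--     for p, g in work[1:]:
--         acc = p + max(g, acc)
--     return max(0, acc)
-- ===== Notes on version B (the rewrite author's own statement) =====
-- stated objective: alternative
-- what changed: B replaces A's two-accumulator descending scan (running plant-time offset plus running max of finish times) with a single Horner-style nested-max fold acc = p + max(g, acc) over the ascending grow-time order; no running plant-time sum or candidate maximum is maintained.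
import Mathlib
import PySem

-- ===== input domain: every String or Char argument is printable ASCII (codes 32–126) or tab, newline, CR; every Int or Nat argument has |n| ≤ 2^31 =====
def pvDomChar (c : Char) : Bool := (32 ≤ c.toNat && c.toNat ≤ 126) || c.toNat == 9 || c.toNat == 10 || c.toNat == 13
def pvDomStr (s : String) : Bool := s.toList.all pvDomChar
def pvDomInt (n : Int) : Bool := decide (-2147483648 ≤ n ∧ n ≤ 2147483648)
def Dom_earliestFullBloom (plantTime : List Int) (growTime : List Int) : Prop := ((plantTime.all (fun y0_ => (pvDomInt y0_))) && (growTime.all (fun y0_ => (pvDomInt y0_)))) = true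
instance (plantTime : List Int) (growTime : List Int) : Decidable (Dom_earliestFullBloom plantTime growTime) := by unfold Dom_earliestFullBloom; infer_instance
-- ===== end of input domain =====

-- B: a Horner-style nested-max fold over the ascending grow-time order instead of
-- A's descending scan with a running plant-time offset and running maximum (alternative decomposition).
-- ===== PORT A =====
def pvLoopA : List (Int × Int) → Int → Int → Int
  | [], _, res => res
  | (p, g) :: t, off, res => pvLoopA t (off + p) (max res (p + g + off))

def earliestFullBloom (plantTime : List Int) (growTime : List Int) : Int :=
  let work := (PySem.List.sorted (plantTime.zip growTime) (fun x => x.2) false).reverse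
  pvLoopA work 0 0

-- ===== PORT B =====
def earliestFullBloom_alt (plantTime : List Int) (growTime : List Int) : Int :=
  match PySem.List.sorted (plantTime.zip growTime) (fun x => x.2) false with
  | [] => 0
  | (p0, g0) :: rest => max 0 (rest.foldl (fun acc x => x.1 + max x.2 acc) (p0 + g0))

-- ===== PRECONDITION & SPEC =====
def Spec_earliestFullBloom (plantTime : List Int) (growTime : List Int) (out : Int) : Prop := out = earliestFullBloom_alt plantTime growTime
instance (plantTime : List Int) (growTime : List Int) (out : Int) : Decidable (Spec_earliestFullBloom plantTime growTime out) := by unfold Spec_earliestFullBloom; infer_instance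

-- ===== CLAIM (what is proved, stated in full; the proofs are below) =====
def Claim_equal_earliestFullBloom : Prop := ∀ (plantTime : List Int) (growTime : List Int), Dom_earliestFullBloom plantTime growTime → Spec_earliestFullBloom plantTime growTime (earliestFullBloom plantTime growTime)

-- ===== LEMMAS AND PROOFS =====

-- K d v = the nested-max value p₁ + max(g₁, p₂ + max(g₂, … , v)) read head-first over d.
def pvK : List (Int × Int) → Int → Int
  | [], v => v
  | (p, g) :: t, v => p + max g (pvK t v)

lemma pvK_append (l m : List (Int × Int)) (v : Int) :
    pvK (l ++ m) v = pvK l (pvK m v) := by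
  induction l with
  | nil => rfl
  | cons x t ih => obtain ⟨p, g⟩ := x; simp [pvK, ih]

lemma pvK_reverse (t : List (Int × Int)) (v : Int) :
    pvK t.reverse v = t.foldl (fun acc x => x.1 + max x.2 acc) v := by
  induction t generalizing v with
  | nil => rfl
  | cons x t ih =>
      obtain ⟨p, g⟩ := x
      simp only [List.reverse_cons, pvK_append, List.foldl_cons]
      exact ih (p + max g v)

lemma pvLoopA_append_K (d : List (Int × Int)) (p g off res : Int) :
    pvLoopA (d ++ [(p, g)]) off res = max res (off + pvK d (p + g)) := by
  induction d generalizing off res with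
  | nil => simp [pvLoopA, pvK]; omega
  | cons x t ih =>
      obtain ⟨q, h⟩ := x
      simp only [List.cons_append, pvLoopA, ih, pvK]
      omega

-- ===== VERDICT (by name: the statement is the Claim_ definition above) =====
theorem earliestFullBloom_spec : Claim_equal_earliestFullBloom := by
  intro plantTime growTime _
  unfold Spec_earliestFullBloom earliestFullBloom earliestFullBloom_alt
  cases hw : PySem.List.sorted (plantTime.zip growTime) (fun x => x.2) false with
  | nil => simp [pvLoopA]
  | cons x t =>
      obtain ⟨p0, g0⟩ := x
      simp only [List.reverse_cons]
      rw [pvLoopA_append_K, pvK_reverse]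
      omega
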